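-- pv_equiv track=rewrite | github.com/Jae-soon/Algorithmic | Programmers/Lv2/할인 행사.py | solution
-- ===== SOURCE A (Python) =====
-- def solution(want, number, discount):
--     answer = 0
--     want_dict = dict()
--
--     # 원하는 제품의 개수 dictionary 형태로 저장
--     for i in range(len(want)):
--         want_dict[want[i]] = number[i]
--
--     for i in range(len(discount) - 9):
--         temp_dict = want_dict.copy()
--
--         conv_discount = discount[i:i+10]
--
--         for d in conv_discount:
--
--             if d in temp_dict.keys():
--                 temp_dict[d] -= 1
--
--         if not any(e != 0 for e in list(temp_dict.values())):
--             answer += 1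
--
--     return answer
-- ===== SOURCE B (Python) =====
-- def _adjust(cnt, need, satisfied, d, delta):
--     """Shift the window count of product d by delta, returning the updated
--     number of products whose window count matches the wanted count."""
--     if d in cnt:
--         if cnt[d] == need[d]:
--             satisfied -= 1
--         cnt[d] = cnt[d] + delta
--         if cnt[d] == need[d]:
--             satisfied += 1
--     return satisfied
--
--
-- def solution(want, number, discount):
--     need = {}
--     for w, n in zip(want, number):
--         need[w] = n
--     if len(discount) < 10:
--         return 0
--     cnt = {}
--     for k in need:
--         cnt[k] = 0
--     for d in discount[:10]:
--         if d in cnt: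
--             cnt[d] = cnt[d] + 1
--     total = len(need)
--     satisfied = 0
--     for k in need:
--         if cnt[k] == need[k]:
--             satisfied += 1
--     answer = 1 if satisfied == total else 0
--     for i in range(1, len(discount) - 9):
--         satisfied = _adjust(cnt, need, satisfied, discount[i - 1], -1)
--         satisfied = _adjust(cnt, need, satisfied, discount[i + 9], 1)
--         if satisfied == total:
--             answer += 1
--     return answer
-- ===== Notes on version B (the rewrite author's own statement) =====
-- stated objective: faster
-- what changed: A re-scans every 10-day window with a fresh copy of the wanted-counts dict (decrementing per item, then checking all values are zero); B slides the window once over discount, keeping per-product window counts and a running number of satisfied products, updating only the two products that enter/leave the window each step.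
import Mathlib
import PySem

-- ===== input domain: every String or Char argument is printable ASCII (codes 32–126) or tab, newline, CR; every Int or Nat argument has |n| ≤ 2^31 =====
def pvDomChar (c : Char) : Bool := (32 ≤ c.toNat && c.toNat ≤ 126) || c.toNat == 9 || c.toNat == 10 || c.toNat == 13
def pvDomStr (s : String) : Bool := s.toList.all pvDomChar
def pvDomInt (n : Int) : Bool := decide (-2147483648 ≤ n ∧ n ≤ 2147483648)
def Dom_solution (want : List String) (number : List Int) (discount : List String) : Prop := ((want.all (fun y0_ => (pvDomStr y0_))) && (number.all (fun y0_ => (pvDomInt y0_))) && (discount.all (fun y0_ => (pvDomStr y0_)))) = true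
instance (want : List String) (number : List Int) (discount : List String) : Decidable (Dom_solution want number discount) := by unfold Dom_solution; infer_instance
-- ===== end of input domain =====

-- B replaces A's per-window dict copy + decrement scan (O(n·|want|)) by a single
-- sliding window that updates one count and a running number of satisfied products
-- per step (O(n + |want|)).

-- ===== PORT A =====
def solution (want : List String) (number : List Int) (discount : List String) : Int :=
  let want_dict : PySem.Dict String Int :=
    (PySem.List.pyRange 0 (want.length : Int) 1).foldl
      (fun d i => d.insert (PySem.List.pyGetD want i "") (PySem.List.pyGetD number i 0))
      PySem.Dict.empty
  (PySem.List.pyRange 0 ((discount.length : Int) - 9) 1).foldl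
    (fun answer i =>
      let conv_discount := PySem.List.slice discount (some i) (some (i + 10))
      let temp_dict := conv_discount.foldl
        (fun t d => if t.contains d then t.insert d (t.getD d 0 - 1) else t) want_dict
      if temp_dict.values.any (fun e => decide (e ≠ 0)) then answer else answer + 1)
    0

-- ===== PORT B =====
-- helper: port of Source B's _adjust (cnt is threaded functionally instead of mutated)
def adjB (cnt : PySem.Dict String Int) (need : PySem.Dict String Int) (satisfied : Int)
    (d : String) (delta : Int) : PySem.Dict String Int × Int :=
  if cnt.contains d then
    let s1 := if cnt.getD d 0 = need.getD d 0 then satisfied - 1 else satisfied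
    let cnt' := cnt.insert d (cnt.getD d 0 + delta)
    let s2 := if cnt'.getD d 0 = need.getD d 0 then s1 + 1 else s1
    (cnt', s2)
  else (cnt, satisfied)

def solution_alt (want : List String) (number : List Int) (discount : List String) : Int :=
  let need : PySem.Dict String Int :=
    (want.zip number).foldl (fun t p => t.insert p.1 p.2) PySem.Dict.empty
  if discount.length < 10 then 0
  else
    let cnt0 : PySem.Dict String Int :=
      need.keys.foldl (fun t k => t.insert k 0) PySem.Dict.empty
    let cnt1 := (PySem.List.slice discount none (some 10)).foldl
      (fun t d => if t.contains d then t.insert d (t.getD d 0 + 1) else t) cnt0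
    let total : Int := need.size
    let sat0 : Int := need.keys.foldl
      (fun s k => if cnt1.getD k 0 = need.getD k 0 then s + 1 else s) 0
    let ans0 : Int := if sat0 = total then 1 else 0
    let st := (PySem.List.pyRange 1 ((discount.length : Int) - 9) 1).foldl
      (fun st i =>
        let r1 := adjB st.1 need st.2.1 (PySem.List.pyGetD discount (i - 1) "") (-1)
        let r2 := adjB r1.1 need r1.2 (PySem.List.pyGetD discount (i + 9) "") 1
        (r2.1, r2.2, if r2.2 = total then st.2.2 + 1 else st.2.2))
      (cnt1, sat0, ans0)
    st.2.2

-- ===== PRECONDITION & SPEC =====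
-- Pre_ excludes exactly the inputs where A raises IndexError (number shorter than want).
def Pre_solution (want : List String) (number : List Int) (discount : List String) : Prop :=
  want.length ≤ number.length
instance (want : List String) (number : List Int) (discount : List String) : Decidable (Pre_solution want number discount) := by unfold Pre_solution; infer_instance

def pvWitness_solution : List String × List Int × List String :=
  (["a"], [1], ["a", "b", "a", "c", "d", "e", "f", "g", "h", "i", "a"])

def Spec_solution (want : List String) (number : List Int) (discount : List String) (out : Int) : Prop := out = solution_alt want number discount
instance (want : List String) (number : List Int) (discount : List String) (out : Int) : Decidable (Spec_solution want number discount out) := by unfold Spec_solution; infer_instance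

-- ===== CLAIM (what is proved, stated in full; the proofs are below) =====
def Claim_equal_solution : Prop := ∀ (want : List String) (number : List Int) (discount : List String), Dom_solution want number discount → Pre_solution want number discount → Spec_solution want number discount (solution want number discount)

-- ===== LEMMAS AND PROOFS =====


-- the wanted-products dict both programs build
def needOf (want : List String) (number : List Int) : PySem.Dict String Int :=
  (want.zip number).foldl (fun t p => t.insert p.1 p.2) PySem.Dict.empty

-- the 10-day window starting at day j
def winC (discount : List String) (j : Nat) : List String := (discount.drop j).take 10

-- Boolean: window j satisfies every wanted quantity exactly
def gB (need : PySem.Dict String Int) (discount : List String) (j : Nat) : Bool :=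
  need.keys.all (fun k => decide (((winC discount j).count k : Int) = need.getD k 0))

theorem needOf_nodup (want : List String) (number : List Int) : (needOf want number).keys.Nodup :=
  PySem.Dict.nodup_keys_foldl_insert_key (want.zip number) (fun p => p.1)
    (fun t p => p.2) PySem.Dict.empty (by simp [PySem.Dict.keys_empty])

theorem build_aux (w : List String) : ∀ (nu : List Int) (t : PySem.Dict String Int),
    w.length ≤ nu.length →
    (List.range w.length).foldl (fun d k => d.insert (w.getD k "") (nu.getD k 0)) t
    = (w.zip nu).foldl (fun t p => t.insert p.1 p.2) t := by
  induction w with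
  | nil => intro nu t _; simp
  | cons a w' ih =>
    intro nu t hlen
    cases nu with
    | nil => simp at hlen
    | cons b nu' =>
      rw [List.length_cons, List.range_succ_eq_map, List.foldl_cons, List.foldl_map]
      simp only [List.getD_cons_zero, List.getD_cons_succ]
      rw [ih nu' _ (by simpa using hlen)]
      simp

theorem build_eq_needOf (want : List String) (number : List Int)
    (h : want.length ≤ number.length) :
    (PySem.List.pyRange 0 (want.length : Int) 1).foldl
      (fun d i => d.insert (PySem.List.pyGetD want i "") (PySem.List.pyGetD number i 0))
      PySem.Dict.empty = needOf want number := by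
  rw [PySem.List.pyRange_one, List.foldl_map]
  simp only [zero_add, Int.sub_zero, Int.toNat_natCast, PySem.List.pyGetD_natCast]
  exact build_aux want number PySem.Dict.empty h

theorem countP_update (L : List String) (q q' : String → Bool) (d : String)
    (hnd : L.Nodup) (hd : d ∈ L) (hq : ∀ k, k ≠ d → q' k = q k) :
    (L.countP q' : Int) = (L.countP q : Int)
      - (if q d then 1 else 0) + (if q' d then 1 else 0) := by
  induction L with
  | nil => simp at hd
  | cons a t ih =>
    rw [List.countP_cons, List.countP_cons]
    rcases List.mem_cons.mp hd with rfl | hdt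
    · have hnt : d ∉ t := (List.nodup_cons.mp hnd).1
      have : t.countP q' = t.countP q := List.countP_congr (fun k hk => by rw [hq k (fun he => hnt (he ▸ hk))])
      rw [this]
      push_cast
      by_cases h1 : q d <;> by_cases h2 : q' d <;> simp [h1, h2] <;> ring
    · have hda : d ≠ a := fun he => (List.nodup_cons.mp hnd).1 (he ▸ hdt)
      have := ih (List.nodup_cons.mp hnd).2 hdt
      rw [hq a (Ne.symm hda)]
      push_cast at this ⊢
      by_cases h1 : q a <;> simp [h1] <;> omega

theorem adjIf (L : List String) (f : String → Int) (d : String) (δ : Int) (hnd : L.Nodup) :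
    (let t : PySem.Dict String Int := PySem.Dict.mk (L.map fun k => (k, f k));
      if t.contains d then t.insert d (t.getD d 0 + δ) else t)
    = PySem.Dict.mk (L.map fun k => (k, if k = d then f k + δ else f k)) := by
  have hkeys : (PySem.Dict.mk (L.map fun k => (k, f k)) : PySem.Dict String Int).keys = L := by
    simp only [PySem.Dict.keys, List.map_map]
    rw [show ((fun x => x.1) ∘ fun k => ((k, f k) : String × Int)) = (id : String → String) from rfl, List.map_id]
  have hknd : (PySem.Dict.mk (L.map fun k => (k, f k)) : PySem.Dict String Int).keys.Nodup := by
    rw [hkeys]; exact hnd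
  by_cases hd : d ∈ L
  · have hcon : (PySem.Dict.mk (L.map fun k => (k, f k)) : PySem.Dict String Int).contains d = true := by
      rw [PySem.Dict.contains_iff_mem_keys, hkeys]; exact hd
    have hget : (PySem.Dict.mk (L.map fun k => (k, f k)) : PySem.Dict String Int).getD d 0 = f d :=
      PySem.Dict.getD_of_mem_items _ (show ((d, f d) : String × Int) ∈ (L.map fun k => (k, f k)) from List.mem_map.mpr ⟨d, hd, rfl⟩) hknd 0
    simp only [hcon, if_pos, hget]
    apply PySem.Dict.ext
    rw [PySem.Dict.items_insert_of_contains (h := hcon)]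
    show (L.map fun k => (k, f k)).map _ = _
    rw [List.map_map]
    apply List.map_congr_left
    intro k _
    by_cases hkd : k = d
    · subst hkd; simp
    · simp [hkd]
  · have hcon : (PySem.Dict.mk (L.map fun k => (k, f k)) : PySem.Dict String Int).contains d = false := by
      rw [← Bool.not_eq_true, PySem.Dict.contains_iff_mem_keys, hkeys]; exact hd
    simp only [hcon, Bool.false_eq_true, if_false]
    apply PySem.Dict.ext
    show (L.map fun k => (k, f k)) = _
    apply List.map_congr_left
    intro k hk
    have : k ≠ d := fun he => hd (he ▸ hk)
    simp [this]

theorem foldAdj (w : List String) (L : List String) (f : String → Int) (δ : Int) (hnd : L.Nodup) :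
    w.foldl (fun t d => if t.contains d then t.insert d (t.getD d 0 + δ) else t)
      (PySem.Dict.mk (L.map fun k => (k, f k)))
    = PySem.Dict.mk (L.map fun k => (k, f k + δ * (w.count k : Int))) := by
  induction w generalizing f with
  | nil =>
    simp only [List.foldl_nil, List.count_nil]
    congr 1
    apply List.map_congr_left
    intro k _; simp
  | cons d w' ih =>
    rw [List.foldl_cons, adjIf L f d δ hnd, ih]
    congr 1
    apply List.map_congr_left
    intro k _
    by_cases hkd : k = d
    · subst hkd
      simp [List.count_cons, mul_add]
      ring
    · have : d ≠ k := Ne.symm hkd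
      simp [hkd, List.count_cons, this]

theorem adjB_spec (need : PySem.Dict String Int) (hnd : need.keys.Nodup)
    (f : String → Int) (d : String) (δ : Int) :
    adjB (PySem.Dict.mk (need.keys.map fun k => (k, f k))) need
        ((need.keys.countP fun k => decide (f k = need.getD k 0) : Nat) : Int) d δ
    = (PySem.Dict.mk (need.keys.map fun k => (k, if k = d then f k + δ else f k)),
       ((need.keys.countP fun k => decide ((if k = d then f k + δ else f k) = need.getD k 0) : Nat) : Int)) := by
  obtain ⟨L, hL⟩ : ∃ L, need.keys = L := ⟨_, rfl⟩
  rw [hL] at hnd ⊢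
  have hkeys : (PySem.Dict.mk (L.map fun k => (k, f k)) : PySem.Dict String Int).keys = L := by
    simp only [PySem.Dict.keys, List.map_map]
    rw [show ((fun x => x.1) ∘ fun k => ((k, f k) : String × Int)) = (id : String → String) from rfl, List.map_id]
  have hknd : (PySem.Dict.mk (L.map fun k => (k, f k)) : PySem.Dict String Int).keys.Nodup := by
    rw [hkeys]; exact hnd
  by_cases hd : d ∈ L
  · have hcon : (PySem.Dict.mk (L.map fun k => (k, f k)) : PySem.Dict String Int).contains d = true := by
      rw [PySem.Dict.contains_iff_mem_keys, hkeys]; exact hd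
    have hget : (PySem.Dict.mk (L.map fun k => (k, f k)) : PySem.Dict String Int).getD d 0 = f d :=
      PySem.Dict.getD_of_mem_items _ (show ((d, f d) : String × Int) ∈ (L.map fun k => (k, f k)) from List.mem_map.mpr ⟨d, hd, rfl⟩) hknd 0
    have hins := adjIf L f d δ hnd
    simp only [hcon, if_pos, hget] at hins
    have hget' : (PySem.Dict.mk (L.map fun k => (k, if k = d then f k + δ else f k)) : PySem.Dict String Int).getD d 0 = f d + δ := by
      have := PySem.Dict.getD_of_mem_items
        (PySem.Dict.mk (L.map fun k => (k, if k = d then f k + δ else f k)))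
        (show ((d, if d = d then f d + δ else f d) : String × Int) ∈ (L.map fun k => (k, if k = d then f k + δ else f k)) from List.mem_map.mpr ⟨d, hd, rfl⟩)
        (by simp only [PySem.Dict.keys, List.map_map]
            rw [show ((fun x => x.1) ∘ fun k => ((k, if k = d then f k + δ else f k) : String × Int)) = (id : String → String) from rfl, List.map_id]
            exact hnd) 0
      simpa using this
    unfold adjB
    rw [hcon]
    simp only [if_pos, hget, hins, hget']
    have hcp := countP_update L (fun k => decide (f k = need.getD k 0))
      (fun k => decide ((if k = d then f k + δ else f k) = need.getD k 0)) d hnd hd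
      (fun k hk => by simp [hk])
    simp only [Prod.mk.injEq]
    refine ⟨by trivial, ?_⟩
    rw [hcp]
    simp only [if_pos rfl]
    by_cases h1 : f d = need.getD d 0 <;> by_cases h2 : f d + δ = need.getD d 0 <;>
      simp [h1, h2] <;> omega
  · have hcon : (PySem.Dict.mk (L.map fun k => (k, f k)) : PySem.Dict String Int).contains d = false := by
      rw [← Bool.not_eq_true, PySem.Dict.contains_iff_mem_keys, hkeys]; exact hd
    unfold adjB
    rw [hcon]
    simp only [Bool.false_eq_true, if_false, Prod.mk.injEq]
    constructor
    · congr 1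
      apply List.map_congr_left
      intro k hk
      have : k ≠ d := fun he => hd (he ▸ hk)
      simp [this]
    · congr 1
      apply List.countP_congr
      intro k hk
      have : k ≠ d := fun he => hd (he ▸ hk)
      simp [this]

theorem winC_cons (discount : List String) (m : Nat) (h : m + 10 ≤ discount.length) :
    winC discount m = discount[m]'(by omega) :: (discount.drop (m + 1)).take 9 := by
  unfold winC
  rw [List.drop_eq_getElem_cons (by omega)]
  rfl

theorem winC_snoc (discount : List String) (m : Nat) (h : m + 11 ≤ discount.length) :
    winC discount (m + 1) = (discount.drop (m + 1)).take 9 ++ [discount[m + 10]'(by omega)] := by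
  unfold winC
  have : List.take 10 (List.drop (m+1) discount) = List.take 9 (List.drop (m+1) discount) ++ ((List.drop (m+1) discount)[9]?).toList := List.take_succ
  rw [this]
  congr 1
  rw [List.getElem?_drop]
  rw [List.getElem?_eq_getElem (by omega)]
  rfl

theorem A_body (need : PySem.Dict String Int) (hnd : need.keys.Nodup)
    (w : List String) (a : Int) :
    (if (w.foldl (fun t d => if t.contains d then t.insert d (t.getD d 0 - 1) else t) need).values.any
        (fun e => decide (e ≠ 0)) then a else a + 1)
    = if need.keys.all (fun k => decide ((w.count k : Int) = need.getD k 0)) then a + 1 else a := by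
  have hneed : need = PySem.Dict.mk (need.keys.map fun k => (k, need.getD k 0)) :=
    PySem.Dict.ext (PySem.Dict.items_eq_map_keys need hnd 0)
  obtain ⟨L, hL⟩ : ∃ L, need.keys = L := ⟨_, rfl⟩
  rw [hL] at hnd ⊢
  conv_lhs => rw [hneed, hL]
  simp only [sub_eq_add_neg]
  rw [foldAdj w L (fun k => need.getD k 0) (-1) hnd]
  have hval : (PySem.Dict.mk (L.map fun k => (k, need.getD k 0 + (-1) * (w.count k : Int))) : PySem.Dict String Int).values
      = L.map (fun k => need.getD k 0 + (-1) * (w.count k : Int)) := by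
    simp [PySem.Dict.values, List.map_map, Function.comp]
  rw [hval, List.any_map]
  by_cases hg : L.all (fun k => decide ((w.count k : Int) = need.getD k 0)) = true
  · have hall := List.all_eq_true.mp hg
    have hany : (L.any ((fun e => decide (e ≠ 0)) ∘ fun k => need.getD k 0 + (-1) * (w.count k : Int))) = false := by
      rw [List.any_eq_false]
      intro k hk
      have := of_decide_eq_true (hall k hk)
      simp [Function.comp]
      omega
    rw [hany, hg]
    simp
  · have hex : ∃ k ∈ L, ¬ ((w.count k : Int) = need.getD k 0) := by
      by_contra hc
      push_neg at hc
      exact hg (List.all_eq_true.mpr (fun k hk => decide_eq_true (hc k hk)))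
    obtain ⟨k, hk, hne⟩ := hex
    have hany : (L.any ((fun e => decide (e ≠ 0)) ∘ fun k => need.getD k 0 + (-1) * (w.count k : Int))) = true := by
      rw [List.any_eq_true]
      refine ⟨k, hk, ?_⟩
      simp [Function.comp]
      omega
    rw [hany, if_pos rfl]
    simp only [Bool.not_eq_true] at hg
    rw [hg]
    simp

theorem A_eq_count (want : List String) (number : List Int) (discount : List String)
    (h : want.length ≤ number.length) :
    solution want number discount
    = ((List.range (discount.length - 9)).countP (gB (needOf want number) discount) : Int) := by
  unfold solution
  rw [build_eq_needOf want number h]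
  rw [PySem.List.pyRange_one]
  have h1 : ((discount.length : Int) - 9 - 0).toNat = discount.length - 9 := by omega
  rw [h1, List.foldl_map]
  have hbody : (fun (answer : Int) (k : Nat) =>
      (fun (answer : Int) (i : Int) =>
        let conv_discount := PySem.List.slice discount (some i) (some (i + 10))
        let temp_dict := conv_discount.foldl
          (fun t d => if t.contains d then t.insert d (t.getD d 0 - 1) else t) (needOf want number)
        if temp_dict.values.any (fun e => decide (e ≠ 0)) then answer else answer + 1) answer ((0 : Int) + (k : Int)))
      = fun (answer : Int) (k : Nat) => if gB (needOf want number) discount k then answer + 1 else answer := by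
    funext a k
    simp only [zero_add]
    have hs : PySem.List.slice discount (some (k : Int)) (some ((k : Int) + 10)) = winC discount k := by
      rw [show ((10 : Int)) = ((10 : Nat) : Int) from rfl, PySem.List.slice_natCast_add]
      rfl
    rw [hs]
    exact A_body (needOf want number) (needOf_nodup want number) (winC discount k) a
  rw [hbody, PySem.List.foldl_if_add_one]
  simp [gB]

theorem size_eq_keys_length (need : PySem.Dict String Int) : need.size = need.keys.length := by
  simp [PySem.Dict.size, PySem.Dict.keys]

theorem sat_total (need : PySem.Dict String Int) (p : String → Prop) [DecidablePred p] :
    (((need.keys.countP fun k => decide (p k) : Nat) : Int) = (need.size : Int))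
    ↔ need.keys.all (fun k => decide (p k)) = true := by
  rw [size_eq_keys_length, Nat.cast_inj, List.countP_eq_length, List.all_eq_true]

-- the sliding-window invariant of B's main loop

theorem B_loop (need : PySem.Dict String Int) (hnd : need.keys.Nodup) (discount : List String)
    (m : Nat) (hm : m + 10 ≤ discount.length) (a : Int) :
    (List.range m).foldl
      (fun (st : PySem.Dict String Int × Int × Int) (k : Nat) =>
        let r1 := adjB st.1 need st.2.1 (PySem.List.pyGetD discount ((1 + (k : Int)) - 1) "") (-1)
        let r2 := adjB r1.1 need r1.2 (PySem.List.pyGetD discount ((1 + (k : Int)) + 9) "") 1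
        (r2.1, r2.2, if r2.2 = (need.size : Int) then st.2.2 + 1 else st.2.2))
      (PySem.Dict.mk (need.keys.map fun k => (k, ((winC discount 0).count k : Int))),
       ((need.keys.countP fun k => decide (((winC discount 0).count k : Int) = need.getD k 0) : Nat) : Int),
       a)
    = (PySem.Dict.mk (need.keys.map fun k => (k, ((winC discount m).count k : Int))),
       ((need.keys.countP fun k => decide (((winC discount m).count k : Int) = need.getD k 0) : Nat) : Int),
       a + (((List.range m).countP (fun k => gB need discount (k + 1)) : Nat) : Int)) := by
  induction m with
  | zero => simp
  | succ m ih =>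
    rw [List.range_succ, List.foldl_append, ih (by omega)]
    simp only [List.foldl_cons, List.foldl_nil]
    -- index values
    have hd1 : PySem.List.pyGetD discount ((1 + (m : Int)) - 1) "" = discount[m]'(by omega) := by
      rw [show (1 + (m : Int)) - 1 = ((m : Nat) : Int) by ring, PySem.List.pyGetD_natCast]
      exact List.getD_eq_getElem _ _ (by omega)
    have hd2 : PySem.List.pyGetD discount ((1 + (m : Int)) + 9) "" = discount[m + 10]'(by omega) := by
      rw [show (1 + (m : Int)) + 9 = ((m + 10 : Nat) : Int) by push_cast; ring, PySem.List.pyGetD_natCast]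
      exact List.getD_eq_getElem _ _ (by omega)
    rw [hd1, hd2]
    rw [adjB_spec need hnd _ _ _]
    have key1 : ∀ k : String, (if k = discount[m]'(by omega) then ((winC discount m).count k : Int) + (-1) else ((winC discount m).count k : Int))
        = (((discount.drop (m + 1)).take 9).count k : Int) := by
      intro k
      rw [winC_cons discount m (by omega)]
      by_cases hkd : k = discount[m]'(by omega)
      · simp [hkd, List.count_cons]
      · have : discount[m]'(by omega) ≠ k := fun he => hkd he.symm
        simp [hkd, List.count_cons, this]
    have hf1a : (fun k => ((k, if k = discount[m]'(by omega) then ((winC discount m).count k : Int) + (-1) else ((winC discount m).count k : Int)) : String × Int))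
        = fun k => ((k, (((discount.drop (m + 1)).take 9).count k : Int)) : String × Int) := by
      funext k; rw [key1 k]
    have hf1b : (fun k => decide ((if k = discount[m]'(by omega) then ((winC discount m).count k : Int) + (-1) else ((winC discount m).count k : Int)) = need.getD k 0))
        = fun k => decide ((((discount.drop (m + 1)).take 9).count k : Int) = need.getD k 0) := by
      funext k; rw [key1 k]
    rw [hf1a, hf1b]
    simp only []
    rw [adjB_spec need hnd _ _ _]
    have key2 : ∀ k : String, (if k = discount[m + 10]'(by omega) then (((discount.drop (m + 1)).take 9).count k : Int) + 1 else (((discount.drop (m + 1)).take 9).count k : Int))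
        = ((winC discount (m + 1)).count k : Int) := by
      intro k
      rw [winC_snoc discount m (by omega)]
      by_cases hkd : k = discount[m + 10]'(by omega)
      · simp [hkd, List.count_append]
      · have : discount[m + 10]'(by omega) ≠ k := fun he => hkd he.symm
        simp [hkd, List.count_append, this]
    have hf2a : (fun k => ((k, if k = discount[m + 10]'(by omega) then (((discount.drop (m + 1)).take 9).count k : Int) + 1 else (((discount.drop (m + 1)).take 9).count k : Int)) : String × Int))
        = fun k => ((k, ((winC discount (m + 1)).count k : Int)) : String × Int) := by
      funext k; rw [key2 k]
    have hf2b : (fun k => decide ((if k = discount[m + 10]'(by omega) then (((discount.drop (m + 1)).take 9).count k : Int) + 1 else (((discount.drop (m + 1)).take 9).count k : Int)) = need.getD k 0))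
        = fun k => decide (((winC discount (m + 1)).count k : Int) = need.getD k 0) := by
      funext k; rw [key2 k]
    rw [hf2a, hf2b]
    simp only [Prod.mk.injEq]
    refine ⟨by trivial, by trivial, ?_⟩
    rw [List.countP_append]
    by_cases hgb : gB need discount (m + 1) = true
    · rw [if_pos ((sat_total need _).mpr hgb)]
      have : ([m].countP fun k => gB need discount (k + 1)) = 1 := by
        simp [List.countP_cons, hgb]
      rw [this]
      push_cast
      ring
    · rw [if_neg (fun hc => hgb ((sat_total need _).mp hc))]
      have : ([m].countP fun k => gB need discount (k + 1)) = 0 := by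
        simp [List.countP_cons]
        simpa using hgb
      rw [this]
      push_cast
      ring

theorem getD_mk_map (L : List String) (f : String → Int) (k : String)
    (hk : k ∈ L) (hnd : L.Nodup) :
    (PySem.Dict.mk (L.map fun k => (k, f k)) : PySem.Dict String Int).getD k 0 = f k := by
  refine PySem.Dict.getD_of_mem_items _ (show ((k, f k) : String × Int) ∈ (L.map fun k => (k, f k)) from List.mem_map.mpr ⟨k, hk, rfl⟩) ?_ 0
  simp only [PySem.Dict.keys, List.map_map]
  rw [show ((fun x => x.1) ∘ fun k => ((k, f k) : String × Int)) = (id : String → String) from rfl, List.map_id]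
  exact hnd

theorem B_eq_count (want : List String) (number : List Int) (discount : List String) :
    solution_alt want number discount
    = ((List.range (discount.length - 9)).countP (gB (needOf want number) discount) : Int) := by
  have hnd := needOf_nodup want number
  have hdef : solution_alt want number discount =
      (if discount.length < 10 then (0 : Int) else
        ((PySem.List.pyRange 1 ((discount.length : Int) - 9) 1).foldl
          (fun (st : PySem.Dict String Int × Int × Int) i =>
            let r1 := adjB st.1 (needOf want number) st.2.1 (PySem.List.pyGetD discount (i - 1) "") (-1)
            let r2 := adjB r1.1 (needOf want number) r1.2 (PySem.List.pyGetD discount (i + 9) "") 1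
            (r2.1, r2.2, if r2.2 = ((needOf want number).size : Int) then st.2.2 + 1 else st.2.2))
          ((PySem.List.slice discount none (some 10)).foldl
             (fun t d => if t.contains d then t.insert d (t.getD d 0 + 1) else t)
             ((needOf want number).keys.foldl (fun t k => t.insert k 0) PySem.Dict.empty),
           (needOf want number).keys.foldl
             (fun s k => if ((PySem.List.slice discount none (some 10)).foldl
                 (fun t d => if t.contains d then t.insert d (t.getD d 0 + 1) else t)
                 ((needOf want number).keys.foldl (fun t k => t.insert k 0) PySem.Dict.empty)).getD k 0
                 = (needOf want number).getD k 0 then s + 1 else s) 0,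
           if ((needOf want number).keys.foldl
             (fun s k => if ((PySem.List.slice discount none (some 10)).foldl
                 (fun t d => if t.contains d then t.insert d (t.getD d 0 + 1) else t)
                 ((needOf want number).keys.foldl (fun t k => t.insert k 0) PySem.Dict.empty)).getD k 0
                 = (needOf want number).getD k 0 then s + 1 else s) 0)
               = ((needOf want number).size : Int) then (1 : Int) else 0)).2.2) := rfl
  rw [hdef]
  by_cases hlen : discount.length < 10
  · rw [if_pos hlen]
    have h9 : discount.length - 9 = 0 := by omega
    rw [h9]
    simp
  · rw [if_neg hlen]
    have hcnt0 : ((needOf want number).keys.foldl (fun t k => t.insert k 0) PySem.Dict.empty)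
        = PySem.Dict.mk ((needOf want number).keys.map fun k => (k, (0 : Int))) := by
      apply PySem.Dict.ext
      have h := PySem.Dict.items_foldl_insert_fresh (l := (needOf want number).keys)
        (k := fun a => a) (v := fun _ => (0 : Int)) (d := PySem.Dict.empty)
        (by intro a _; exact PySem.Dict.contains_empty a) (by simpa using hnd)
      simpa using h
    rw [hcnt0]
    have hsl : PySem.List.slice discount none (some 10) = winC discount 0 := by
      rw [PySem.List.slice_to discount (by norm_num)]
      simp [winC]
    rw [hsl]
    rw [foldAdj (winC discount 0) (needOf want number).keys (fun _ => (0 : Int)) 1 hnd]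
    have hc1 : (fun k => ((k, (0 : Int) + 1 * ((winC discount 0).count k : Int)) : String × Int))
        = fun k => ((k, ((winC discount 0).count k : Int)) : String × Int) := by
      funext k; simp
    rw [hc1]
    rw [PySem.List.foldl_ite_add_one]
    have hsat : (List.countP (fun k => decide ((PySem.Dict.mk ((needOf want number).keys.map
          fun k => (k, ((winC discount 0).count k : Int))) : PySem.Dict String Int).getD k 0
          = (needOf want number).getD k 0)) (needOf want number).keys)
        = List.countP (fun k => decide (((winC discount 0).count k : Int) = (needOf want number).getD k 0))
            (needOf want number).keys := by
      apply List.countP_congr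
      intro k hk
      rw [getD_mk_map _ _ k hk hnd]
    rw [hsat]
    rw [PySem.List.pyRange_one]
    have h10 : ((discount.length : Int) - 9 - 1).toNat = discount.length - 10 := by omega
    rw [h10, List.foldl_map]
    simp only [zero_add]
    rw [B_loop (needOf want number) hnd discount (discount.length - 10) (by omega)]
    have hsplit : discount.length - 9 = (discount.length - 10) + 1 := by omega
    rw [hsplit, List.range_succ_eq_map, List.countP_cons, List.countP_map]
    simp only [Function.comp_def, Nat.succ_eq_add_one]
    have hiff := sat_total (needOf want number)
      (fun k => ((winC discount 0).count k : Int) = (needOf want number).getD k 0)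
    by_cases hg : gB (needOf want number) discount 0 = true
    · rw [if_pos (hiff.mpr hg), if_pos hg]
      push_cast
      ring
    · rw [if_neg (fun hc => hg (hiff.mp hc)), if_neg (by simpa using hg)]
      push_cast
      ring

-- ===== VERDICT (by name: the statement is the Claim_ definition above) =====
theorem solution_spec : Claim_equal_solution := by
  intro want number discount _ hpre
  unfold Spec_solution
  rw [A_eq_count want number discount hpre, B_eq_count]
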